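-- pv_equiv track=rewrite | github.com/ryndvs96/aoc | 2020/day20/solve.py | flip_vert
-- ===== SOURCE A (Python) =====
-- from copy import copy, deepcopy
--
-- def flip_vert(grid):
--     n,m = len(grid), len(grid[0])
--     newgrid = deepcopy(grid)
--     for i in range(n):
--         if i > 0 and i < n-1:
--             iters = [0, m-1]
--         else:
--             iters = range(m)
--         for j in iters:
--             c = grid[i][j]
--             newi = n - i - 1
--             newj = j
--             newgrid[newi][newj] = c
--     return newgrid
-- ===== SOURCE B (Python) =====
-- def flip_vert(grid):
--     n, m = len(grid), len(grid[0])
--     out = [row[:] for row in grid]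
--     for i in range(n // 2):
--         k = n - 1 - i
--         if i == 0:
--             out[i][:m], out[k][:m] = out[k][:m], out[i][:m]
--         else:
--             for c in {0, m - 1}:
--                 out[i][c], out[k][c] = out[k][c], out[i][c]
--     return out
-- ===== Notes on version B (the rewrite author's own statement) =====
-- stated objective: alternative
-- what changed: Instead of deepcopying the grid and writing every border cell of the mirror image from the source, B exploits that a vertical flip is an involution and swaps symmetric row pairs in place over the top half only (the outer pair swaps its first-m segments, inner pairs swap just their two border cells); Pre_ excludes grids where A raises IndexError (empty grid, a row shorter than row 0, an empty interior row) and grids with an empty first row and three or more rows, where A's returned value arises from negative-index wraparound (m-1 = -1), an accident no caller would specify.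
-- outside the precondition, e.g. on flip_vert([[], ['x'], ['y'], []]): A returns [[], ['y'], ['x'], []], B returns [[], ['x'], ['y'], []]
import Mathlib
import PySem

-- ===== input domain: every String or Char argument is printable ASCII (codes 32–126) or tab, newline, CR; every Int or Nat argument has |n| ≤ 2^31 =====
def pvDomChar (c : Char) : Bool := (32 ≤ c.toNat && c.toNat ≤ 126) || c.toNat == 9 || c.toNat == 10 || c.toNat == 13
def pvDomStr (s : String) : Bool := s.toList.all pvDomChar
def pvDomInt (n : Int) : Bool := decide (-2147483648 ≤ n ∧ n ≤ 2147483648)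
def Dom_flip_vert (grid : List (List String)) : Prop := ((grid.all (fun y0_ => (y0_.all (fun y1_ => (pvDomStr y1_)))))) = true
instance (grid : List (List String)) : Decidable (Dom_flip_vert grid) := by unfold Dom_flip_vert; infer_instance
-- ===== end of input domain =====

-- B swaps symmetric row pairs in place over the top half (slice swap for the outer pair, two border-cell swaps for inner pairs) instead of A's deepcopy-then-write-every-border-cell-of-the-mirror (alternative decomposition, same cost).


-- ===== PORT A =====
-- deepcopy(grid) of a list of lists of (immutable) strings is ported as the list itself;
-- all element reads/writes are in range under Pre_, so getD defaults are unreachable there.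
def flip_vert (grid : List (List String)) : List (List String) :=
  let n := grid.length
  let m := (grid.getD 0 []).length
  (List.range n).foldl (fun newgrid i =>
    let iters := if 0 < i ∧ i < n - 1 then [0, m - 1] else List.range m
    iters.foldl (fun ng j =>
      let c := (grid.getD i []).getD j ""
      let newi := n - i - 1
      let newj := j
      ng.set newi ((ng.getD newi []).set newj c)) newgrid) grid

-- ===== PORT B =====
-- [row[:] for row in grid] : row copies are identity on immutable lists.
-- out[i][:m], out[k][:m] = out[k][:m], out[i][:m] : slice-assignment swap of the first m
-- cells of the two rows (Python's [:m] clamps, the assignment keeps everything from index m on).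
-- for c in {0, m-1} : the set literal is [0] when m = 1 and [0, m-1] when m ≥ 2; the loop body
-- swaps one cell of the two rows (both reads happen before both writes). m = 0 together with an
-- interior row cannot reach this branch inside Pre_ (Python would then iterate {0, -1} and wrap).
def flip_vert_alt (grid : List (List String)) : List (List String) :=
  let n := grid.length
  let m := (grid.getD 0 []).length
  let out := grid
  (List.range (n / 2)).foldl (fun out i =>
    let k := n - 1 - i
    if i = 0 then
      let ri := out.getD i []
      let rk := out.getD k []
      (out.set i (rk.take m ++ ri.drop m)).set k (ri.take m ++ rk.drop m)
    else
      let cs := if m = 1 then [0] else [0, m - 1]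
      cs.foldl (fun out c =>
        let ri := out.getD i []
        let rk := out.getD k []
        (out.set i (ri.set c (rk.getD c ""))).set k (rk.set c (ri.getD c ""))) out) out

-- ===== PRECONDITION & SPEC =====
-- Pre_ excludes the empty grid, grids with a row shorter than row 0 and grids with an empty
-- interior row (Python A raises IndexError on all of those), and grids with an empty first row
-- and three or more rows: where A returns there, its writes go through the Python index
-- m-1 = -1, i.e. negative-index wraparound on the last cell, an accident no caller would specify.
def Pre_flip_vert (grid : List (List String)) : Prop :=
  grid ≠ [] ∧ (∀ row ∈ grid, (grid.getD 0 []).length ≤ row.length) ∧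
    ((grid.getD 0 []).length = 0 → grid.length ≤ 2)
instance (grid : List (List String)) : Decidable (Pre_flip_vert grid) := by unfold Pre_flip_vert; infer_instance
def pvWitness_flip_vert : List (List String) := [["a", "b"], ["c", "d"], ["e", "f"]]
def Spec_flip_vert (grid : List (List String)) (out : List (List String)) : Prop := out = flip_vert_alt grid
instance (grid : List (List String)) (out : List (List String)) : Decidable (Spec_flip_vert grid out) := by unfold Spec_flip_vert; infer_instance

-- ===== CLAIM (what is proved, stated in full; the proofs are below) =====
def Claim_equal_flip_vert : Prop := ∀ (grid : List (List String)), Dom_flip_vert grid → Pre_flip_vert grid → Spec_flip_vert grid (flip_vert grid)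

-- ===== LEMMAS AND PROOFS =====

-- the cell value both programs put at (r, j) for j < m: mirrored row on the border, same cell inside
def pvCell (grid : List (List String)) (r j : Nat) : String :=
  let n := grid.length
  let m := (grid.getD 0 []).length
  if r = 0 ∨ r = n - 1 ∨ j = 0 ∨ j = m - 1
  then (grid.getD (n - 1 - r) []).getD j ""
  else (grid.getD r []).getD j ""

-- the common result: border cells mirrored inside the first m columns, everything else kept
def pvRow (grid : List (List String)) (r : Nat) : List String :=
  (List.range (grid.getD 0 []).length).map (fun j => pvCell grid r j) ++
    (grid.getD r []).drop (grid.getD 0 []).length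

def pvTarget (grid : List (List String)) : List (List String) :=
  (List.range grid.length).map (fun r => pvRow grid r)

-- getD-world toolbox -------------------------------------------------------

theorem pv_eq_of_getD {α : Type} (d : α) (l1 l2 : List α) (hlen : l1.length = l2.length)
    (h : ∀ j < l1.length, l1.getD j d = l2.getD j d) : l1 = l2 := by
  apply List.ext_getElem hlen
  intro j h1 h2
  have := h j h1
  rwa [List.getD_eq_getElem _ _ h1, List.getD_eq_getElem _ _ h2] at this

theorem pv_getD_set {α : Type} (l : List α) (i k : Nat) (x d : α) :
    (l.set i x).getD k d = if k = i ∧ i < l.length then x else l.getD k d := by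
  simp only [List.getD, List.getElem?_set]
  split_ifs with h1 h2 h3 <;> simp_all

theorem pv_getD_set2 {α : Type} (l : List α) (i k : Nat) (A B : α) (r : Nat) (d : α) :
    ((l.set i A).set k B).getD r d =
      if r = k ∧ k < l.length then B else if r = i ∧ i < l.length then A else l.getD r d := by
  rw [pv_getD_set]
  simp only [List.length_set]
  rw [pv_getD_set]

theorem pv_getD_append {α : Type} (a b : List α) (j : Nat) (d : α) :
    (a ++ b).getD j d = if j < a.length then a.getD j d else b.getD (j - a.length) d := by
  simp only [List.getD, List.getElem?_append]
  split_ifs <;> rfl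

theorem pv_getD_map_range (f : Nat → String) (m j : Nat) (h : j < m) :
    (((List.range m).map f).getD j "") = f j := by
  simp only [List.getD, List.getElem?_map, List.getElem?_range h, Option.map_some, Option.getD_some]

theorem pv_getD_drop {α : Type} (l : List α) (i j : Nat) (d : α) :
    ((l.drop i).getD j d) = l.getD (i + j) d := by
  simp [List.getD, List.getElem?_drop]

theorem pv_getD_take {α : Type} (l : List α) (i j : Nat) (d : α) (h : j < i) :
    ((l.take i).getD j d) = l.getD j d := by
  simp [List.getD, h]

theorem pv_map_getD_take (l : List String) (m : Nat) (h : m ≤ l.length) :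
    (List.range m).map (fun j => l.getD j "") = l.take m := by
  apply pv_eq_of_getD ""
  · simp; omega
  · intro j hj
    simp only [List.length_map, List.length_range] at hj
    rw [pv_getD_map_range _ _ _ hj, pv_getD_take _ _ _ _ hj]

-- pvRow facts --------------------------------------------------------------

theorem pv_length_pvRow (grid : List (List String)) (r : Nat)
    (h : (grid.getD 0 []).length ≤ (grid.getD r []).length) :
    (pvRow grid r).length = (grid.getD r []).length := by
  unfold pvRow
  simp only [List.length_append, List.length_map, List.length_range, List.length_drop]
  omega

theorem pv_pvRow_border (grid : List (List String)) (r : Nat)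
    (hb : r = 0 ∨ r = grid.length - 1)
    (h : (grid.getD 0 []).length ≤ (grid.getD (grid.length - 1 - r) []).length) :
    pvRow grid r = (grid.getD (grid.length - 1 - r) []).take (grid.getD 0 []).length ++
      (grid.getD r []).drop (grid.getD 0 []).length := by
  unfold pvRow
  congr 1
  rw [← pv_map_getD_take _ _ h]
  apply List.map_congr_left
  intro j hj
  unfold pvCell
  rw [if_pos (by tauto)]

theorem pv_pvRow_middle (grid : List (List String)) (r : Nat)
    (hm : grid.length - 1 - r = r)
    (h : (grid.getD 0 []).length ≤ (grid.getD r []).length) :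
    pvRow grid r = grid.getD r [] := by
  unfold pvRow
  have : ∀ j ∈ List.range (grid.getD 0 []).length,
      pvCell grid r j = (grid.getD r []).getD j "" := by
    intro j _
    unfold pvCell
    simp only []
    rw [hm]
    split_ifs <;> rfl
  rw [List.map_congr_left this, pv_map_getD_take _ _ h, List.take_append_drop]

-- B's loop builds pvRow for an interior pair -------------------------------

theorem pv_pvRow_interior (grid : List (List String)) (r : Nat)
    (hr0 : 0 < r) (hrn : r < grid.length - 1)
    (hm1 : 1 ≤ (grid.getD 0 []).length)
    (h : (grid.getD 0 []).length ≤ (grid.getD r []).length) :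
    pvRow grid r =
      ((grid.getD r []).set 0 ((grid.getD (grid.length - 1 - r) []).getD 0 "")).set
        ((grid.getD 0 []).length - 1)
        ((grid.getD (grid.length - 1 - r) []).getD ((grid.getD 0 []).length - 1) "") := by
  set m := (grid.getD 0 []).length with hmdef
  apply pv_eq_of_getD ""
  · rw [pv_length_pvRow _ _ h]; simp
  · intro j hj
    rw [pv_length_pvRow _ _ h] at hj
    rw [pv_getD_set2]
    unfold pvRow
    rw [pv_getD_append]
    simp only [List.length_map, List.length_range, ← hmdef]
    by_cases hjm : j < m
    · rw [if_pos hjm, pv_getD_map_range _ _ _ hjm]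
      by_cases hml : j = m - 1 ∧ m - 1 < (grid.getD r []).length
      · rw [if_pos hml]
        unfold pvCell
        simp only [← hmdef]
        rw [if_pos (Or.inr (Or.inr (Or.inr hml.1))), hml.1]
      · have hjne : j ≠ m - 1 := by
          rintro rfl
          exact hml ⟨rfl, by omega⟩
        rw [if_neg hml]
        by_cases hj0 : j = 0
        · rw [if_pos ⟨hj0, by omega⟩]
          unfold pvCell
          simp only [← hmdef]
          rw [if_pos (Or.inr (Or.inr (Or.inl hj0))), hj0]
        · rw [if_neg (by rintro ⟨h1, -⟩; exact hj0 h1)]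
          unfold pvCell
          simp only [← hmdef]
          rw [if_neg (by rintro (h1 | h1 | h1 | h1) <;> omega)]
    · rw [if_neg hjm, pv_getD_drop,
          if_neg (by rintro ⟨h1, -⟩; omega),
          if_neg (by rintro ⟨h1, -⟩; omega)]
      congr 1
      omega

-- A writes val j into row t at each j ∈ js; rows and row lengths otherwise unchanged
theorem pv_inner_fold (val : Nat → String) (t : Nat) :
    ∀ (js : List Nat) (ng : List (List String)),
      (js.foldl (fun ng j => ng.set t ((ng.getD t []).set j (val j))) ng).length = ng.length ∧
      (∀ k, (((js.foldl (fun ng j => ng.set t ((ng.getD t []).set j (val j))) ng).getD k []).length = (ng.getD k []).length)) ∧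
      (∀ r j, (((js.foldl (fun ng j => ng.set t ((ng.getD t []).set j (val j))) ng).getD r []).getD j "" =
        if r = t ∧ t < ng.length ∧ j ∈ js ∧ j < (ng.getD t []).length then val j else (ng.getD r []).getD j "")) := by
  intro js
  induction js with
  | nil => intro ng; simp
  | cons j0 rest ih =>
    intro ng
    obtain ⟨ihl, ihlen, ihval⟩ := ih (ng.set t ((ng.getD t []).set j0 (val j0)))
    have hsetlen : ((ng.getD t []).set j0 (val j0)).length = (ng.getD t []).length := by simp
    have hlenset : ∀ k, ((ng.set t ((ng.getD t []).set j0 (val j0))).getD k []).length = (ng.getD k []).length := by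
      intro k
      rw [pv_getD_set]
      split_ifs with h
      · rw [hsetlen, h.1]
      · rfl
    refine ⟨by simpa using ihl, ?_, ?_⟩
    · intro k
      simp only [List.foldl_cons]
      rw [ihlen k, hlenset k]
    · intro r j
      simp only [List.foldl_cons]
      rw [ihval r j]
      rw [hlenset t]
      simp only [List.length_set]
      by_cases hr : r = t ∧ t < ng.length ∧ j ∈ rest ∧ j < (ng.getD t []).length
      · rw [if_pos hr, if_pos ⟨hr.1, hr.2.1, List.mem_cons_of_mem _ hr.2.2.1, hr.2.2.2⟩]
      · rw [if_neg hr]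
        rw [pv_getD_set]
        by_cases hm : r = t ∧ t < ng.length
        · rw [if_pos ⟨hm.1, hm.2⟩]
          rw [pv_getD_set]
          by_cases hj : j = j0 ∧ j0 < (ng.getD t []).length
          · rw [if_pos hj, if_pos ⟨hm.1, hm.2, by simp [hj.1], hj.1 ▸ hj.2⟩, hj.1]
          · have hnotc : ¬(r = t ∧ t < ng.length ∧ j ∈ j0 :: rest ∧ j < (ng.getD t []).length) := by
              rintro ⟨h1, h2, h3, h4⟩
              rcases List.mem_cons.mp h3 with h | h
              · exact hj ⟨h, h ▸ h4⟩
              · exact hr ⟨h1, h2, h, h4⟩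
            rw [if_neg hj, if_neg hnotc, hm.1]
        · have hnotc : ¬(r = t ∧ t < ng.length ∧ j ∈ j0 :: rest ∧ j < (ng.getD t []).length) := by
            rintro ⟨h1, h2, _, _⟩
            exact hm ⟨h1, h2⟩
          rw [if_neg hm, if_neg hnotc]

theorem pv_A_eq_target (grid : List (List String)) (hpre : Pre_flip_vert grid) :
    flip_vert grid = pvTarget grid := by
  obtain ⟨hne, hge, hm0⟩ := hpre
  unfold flip_vert pvTarget
  simp only []
  set n := grid.length with hn
  set m := (grid.getD 0 []).length with hm
  have hn0 : 0 < n := List.length_pos_iff.mpr hne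
  have hge' : ∀ r < n, m ≤ (grid.getD r []).length := by
    intro r hr
    rw [List.getD_eq_getElem _ _ hr]
    exact hge _ (List.getElem_mem hr)
  have main : ∀ k ≤ n,
      (((List.range k).foldl (fun newgrid i =>
        let iters := if 0 < i ∧ i < n - 1 then [0, m - 1] else List.range m
        iters.foldl (fun ng j =>
          ng.set (n - i - 1) ((ng.getD (n - i - 1) []).set j ((grid.getD i []).getD j ""))) newgrid) grid).length = n) ∧
      (∀ r, (((List.range k).foldl (fun newgrid i =>
        let iters := if 0 < i ∧ i < n - 1 then [0, m - 1] else List.range m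
        iters.foldl (fun ng j =>
          ng.set (n - i - 1) ((ng.getD (n - i - 1) []).set j ((grid.getD i []).getD j ""))) newgrid) grid).getD r []).length = (grid.getD r []).length) ∧
      (∀ r j, r < n →
        (((List.range k).foldl (fun newgrid i =>
          let iters := if 0 < i ∧ i < n - 1 then [0, m - 1] else List.range m
          iters.foldl (fun ng j =>
            ng.set (n - i - 1) ((ng.getD (n - i - 1) []).set j ((grid.getD i []).getD j ""))) newgrid) grid).getD r []).getD j "" =
          if n - k ≤ r ∧ j < m then pvCell grid r j else (grid.getD r []).getD j "") := by
    intro k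
    induction k with
    | zero =>
      intro _
      refine ⟨by simp [hn], by simp, ?_⟩
      intro r j hr
      rw [if_neg (by omega)]
      simp
    | succ k ih =>
      intro hk
      obtain ⟨ihl, ihlen, ihval⟩ := ih (by omega)
      rw [List.range_succ]
      simp only [List.foldl_append, List.foldl_cons, List.foldl_nil]
      set N := (List.range k).foldl (fun newgrid i =>
        let iters := if 0 < i ∧ i < n - 1 then [0, m - 1] else List.range m
        iters.foldl (fun ng j =>
          ng.set (n - i - 1) ((ng.getD (n - i - 1) []).set j ((grid.getD i []).getD j ""))) newgrid) grid with hN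
      obtain ⟨fl, flen, fval⟩ := pv_inner_fold (fun j => (grid.getD k []).getD j "") (n - k - 1)
        (if 0 < k ∧ k < n - 1 then [0, m - 1] else List.range m) N
      refine ⟨by rw [fl, ihl], ?_, ?_⟩
      · intro r; rw [flen r, ihlen r]
      · intro r j hr
        rw [fval r j]
        have htlen : m ≤ (N.getD (n - k - 1) []).length := by
          rw [ihlen (n - k - 1)]; exact hge' _ (by omega)
        have htN : n - k - 1 < N.length := by rw [ihl]; omega
        by_cases hrt : r = n - k - 1
        · have hold : (N.getD r []).getD j "" = (grid.getD r []).getD j "" := by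
            rw [ihval r j hr, if_neg (by omega)]
          by_cases hjm : j < m
          · by_cases hbk : 0 < k ∧ k < n - 1
            · by_cases hjb : j = 0 ∨ j = m - 1
              · rw [if_pos ⟨hrt, htN, by simp [hbk, hjb], by omega⟩]
                rw [if_pos ⟨by omega, hjm⟩]
                unfold pvCell
                rw [if_pos (by right; right; tauto)]
                simp only [← hn]
                congr 2
                omega
              · rw [if_neg (by simp [hbk]; tauto), hold, if_pos ⟨by omega, hjm⟩]
                unfold pvCell
                rw [if_neg (by rintro (h | h | h | h) <;> omega)]
            · rw [if_pos ⟨hrt, htN, by simp [hbk, List.mem_range, hjm], by omega⟩]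
              rw [if_pos ⟨by omega, hjm⟩]
              unfold pvCell
              rw [if_pos (by simp only [← hn]; omega)]
              simp only [← hn]
              congr 2
              omega
          · rw [if_neg ?_, hold, if_neg (by tauto)]
            rintro ⟨-, -, hmem, -⟩
            by_cases hbk : 0 < k ∧ k < n - 1
            · have hm1 : 1 ≤ m := by
                by_contra h
                have := hm0 (by omega)
                omega
              simp [hbk] at hmem
              omega
            · simp [hbk, List.mem_range] at hmem
              omega
        · rw [if_neg (by tauto), ihval r j hr]
          have : (n - (k + 1) ≤ r ∧ j < m) ↔ (n - k ≤ r ∧ j < m) := by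
            constructor <;> rintro ⟨h1, h2⟩ <;> exact ⟨by omega, h2⟩
          rw [if_congr this rfl rfl]
  obtain ⟨hl, hlen, hval⟩ := main n le_rfl
  apply pv_eq_of_getD ([] : List String)
  · rw [hl]; simp
  · intro r hr
    rw [hl] at hr
    apply pv_eq_of_getD ""
    · rw [hlen r]
      rw [List.getD_eq_getElem _ _ (by simpa using hr : r < ((List.range n).map (fun r => pvRow grid r)).length)]
      simp only [List.getElem_map, List.getElem_range]
      rw [pv_length_pvRow _ _ (hge' r hr)]
    · intro j hj
      rw [hlen r] at hj
      rw [hval r j hr, List.getD_eq_getElem _ _ (by simpa using hr : r < ((List.range n).map (fun r => pvRow grid r)).length)]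
      simp only [List.getElem_map, List.getElem_range]
      unfold pvRow
      rw [pv_getD_append]
      simp only [List.length_map, List.length_range, ← hm]
      by_cases hjm : j < m
      · rw [if_pos ⟨by omega, hjm⟩, if_pos hjm, pv_getD_map_range _ _ _ hjm]
      · rw [if_neg (by tauto), if_neg hjm, pv_getD_drop]
        congr 1
        omega

theorem pv_B_eq_target (grid : List (List String)) (hpre : Pre_flip_vert grid) :
    flip_vert_alt grid = pvTarget grid := by
  obtain ⟨hne, hge, hm0⟩ := hpre
  unfold flip_vert_alt pvTarget
  simp only []
  set n := grid.length with hn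
  set m := (grid.getD 0 []).length with hm
  have hn0 : 0 < n := List.length_pos_iff.mpr hne
  have hge' : ∀ r < n, m ≤ (grid.getD r []).length := by
    intro r hr
    rw [List.getD_eq_getElem _ _ hr]
    exact hge _ (List.getElem_mem hr)
  have main : ∀ q ≤ n / 2,
      (((List.range q).foldl (fun out i =>
        if i = 0 then
          (out.set i ((out.getD (n - 1 - i) []).take m ++ (out.getD i []).drop m)).set (n - 1 - i)
            ((out.getD i []).take m ++ (out.getD (n - 1 - i) []).drop m)
        else
          (if m = 1 then [0] else [0, m - 1]).foldl (fun out c =>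
            (out.set i ((out.getD i []).set c ((out.getD (n - 1 - i) []).getD c ""))).set (n - 1 - i)
              ((out.getD (n - 1 - i) []).set c ((out.getD i []).getD c ""))) out) grid).length = n) ∧
      (∀ r, ((List.range q).foldl (fun out i =>
        if i = 0 then
          (out.set i ((out.getD (n - 1 - i) []).take m ++ (out.getD i []).drop m)).set (n - 1 - i)
            ((out.getD i []).take m ++ (out.getD (n - 1 - i) []).drop m)
        else
          (if m = 1 then [0] else [0, m - 1]).foldl (fun out c =>
            (out.set i ((out.getD i []).set c ((out.getD (n - 1 - i) []).getD c ""))).set (n - 1 - i)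
              ((out.getD (n - 1 - i) []).set c ((out.getD i []).getD c ""))) out) grid).getD r [] =
          if r < q ∨ (n - q ≤ r ∧ r < n) then pvRow grid r else grid.getD r []) := by
    intro q
    induction q with
    | zero =>
      intro _
      refine ⟨by simp [hn], ?_⟩
      intro r
      rw [if_neg (show ¬(r < 0 ∨ (n - 0 ≤ r ∧ r < n)) by omega)]
      simp
    | succ q ih =>
      intro hq
      obtain ⟨ihl, ihval⟩ := ih (by omega)
      rw [List.range_succ]
      simp only [List.foldl_append, List.foldl_cons, List.foldl_nil]
      set N := (List.range q).foldl (fun out i =>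
        if i = 0 then
          (out.set i ((out.getD (n - 1 - i) []).take m ++ (out.getD i []).drop m)).set (n - 1 - i)
            ((out.getD i []).take m ++ (out.getD (n - 1 - i) []).drop m)
        else
          (if m = 1 then [0] else [0, m - 1]).foldl (fun out c =>
            (out.set i ((out.getD i []).set c ((out.getD (n - 1 - i) []).getD c ""))).set (n - 1 - i)
              ((out.getD (n - 1 - i) []).set c ((out.getD i []).getD c ""))) out) grid with hN
      have hq2 : 2 * q + 2 ≤ n := by omega
      have hNi : N.getD q [] = grid.getD q [] := by rw [ihval q, if_neg (by omega)]
      have hNk : N.getD (n - 1 - q) [] = grid.getD (n - 1 - q) [] := by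
        rw [ihval (n - 1 - q), if_neg (by omega)]
      have hik : q ≠ n - 1 - q := by omega
      have hiN : q < N.length := by rw [ihl]; omega
      have hkN : n - 1 - q < N.length := by rw [ihl]; omega
      by_cases hq0 : q = 0
      · subst hq0
        rw [if_pos rfl]
        refine ⟨by simpa using ihl, ?_⟩
        intro r
        rw [pv_getD_set2, hNi, hNk]
        by_cases hrk : r = n - 1 - 0
        · rw [if_pos ⟨hrk, hkN⟩,
              if_pos (show r < 0 + 1 ∨ (n - (0 + 1) ≤ r ∧ r < n) by omega), hrk]
          rw [pv_pvRow_border grid (n - 1 - 0) (by right; omega) (by simp only [← hn, ← hm]; exact hge' _ (by omega))]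
          simp only [← hn, ← hm]
          have he : n - 1 - (n - 1 - 0) = 0 := by omega
          rw [he]
        · rw [if_neg (by rintro ⟨h1, -⟩; exact hrk h1)]
          by_cases hri : r = 0
          · rw [if_pos ⟨hri, hiN⟩,
                if_pos (show r < 0 + 1 ∨ (n - (0 + 1) ≤ r ∧ r < n) by omega), hri]
            rw [pv_pvRow_border grid 0 (by left; rfl) (by simp only [← hn, ← hm]; exact hge' _ (by omega))]
          · rw [if_neg (by rintro ⟨h1, -⟩; exact hri h1), ihval r]
            have : (r < 0 + 1 ∨ (n - (0 + 1) ≤ r ∧ r < n)) ↔ (r < 0 ∨ (n - 0 ≤ r ∧ r < n)) := by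
              constructor
              · rintro (h | ⟨h1, h2⟩)
                · omega
                · exfalso; exact hrk (by omega)
              · rintro (h | ⟨h1, h2⟩) <;> omega
            rw [if_congr this rfl rfl]
      · rw [if_neg hq0]
        -- interior pair: q and n-1-q are both strictly inside
        have hqpos : 0 < q := by omega
        have hm1 : 1 ≤ m := by
          by_contra h
          have := hm0 (by omega)
          omega
        have hqlt : q < n - 1 := by omega
        have hklt : n - 1 - q < n - 1 := by omega
        have hkpos : 0 < n - 1 - q := by omega
        -- evaluate the one or two cell swaps
        have hrowlen_i : m ≤ (grid.getD q []).length := hge' _ (by omega)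
        have hrowlen_k : m ≤ (grid.getD (n - 1 - q) []).length := hge' _ (by omega)
        have step : ∀ r, ((if m = 1 then [0] else [0, m - 1]).foldl (fun out c =>
            (out.set q ((out.getD q []).set c ((out.getD (n - 1 - q) []).getD c ""))).set (n - 1 - q)
              ((out.getD (n - 1 - q) []).set c ((out.getD q []).getD c ""))) N).getD r [] =
            if r = n - 1 - q ∧ n - 1 - q < N.length then
              ((grid.getD (n - 1 - q) []).set 0 ((grid.getD q []).getD 0 "")).set (m - 1)
                ((grid.getD q []).getD (m - 1) "")
            else if r = q ∧ q < N.length then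
              ((grid.getD q []).set 0 ((grid.getD (n - 1 - q) []).getD 0 "")).set (m - 1)
                ((grid.getD (n - 1 - q) []).getD (m - 1) "")
            else N.getD r [] := by
          intro r
          by_cases hmone : m = 1
          · rw [if_pos hmone]
            simp only [List.foldl_cons, List.foldl_nil]
            rw [pv_getD_set2, hNi, hNk, hmone]
            simp [List.set_set]
          · rw [if_neg hmone]
            simp only [List.foldl_cons, List.foldl_nil]
            have hm2 : 2 ≤ m := by omega
            -- first swap (column 0)
            set N1 := (N.set q ((N.getD q []).set 0 ((N.getD (n - 1 - q) []).getD 0 ""))).set (n - 1 - q)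
              ((N.getD (n - 1 - q) []).set 0 ((N.getD q []).getD 0 "")) with hN1
            have hN1len : N1.length = N.length := by simp [hN1]
            have hN1i : N1.getD q [] = (grid.getD q []).set 0 ((grid.getD (n - 1 - q) []).getD 0 "") := by
              rw [hN1, pv_getD_set2, if_neg (by rintro ⟨h1, -⟩; exact hik h1), if_pos ⟨rfl, hiN⟩, hNi, hNk]
            have hN1k : N1.getD (n - 1 - q) [] = (grid.getD (n - 1 - q) []).set 0 ((grid.getD q []).getD 0 "") := by
              rw [hN1, pv_getD_set2, if_pos ⟨rfl, hkN⟩, hNi, hNk]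
            -- second swap (column m-1), reading the once-swapped rows
            rw [pv_getD_set2, hN1len, hN1i, hN1k]
            have hc1 : ((grid.getD (n - 1 - q) []).set 0 ((grid.getD q []).getD 0 "")).getD (m - 1) "" =
                (grid.getD (n - 1 - q) []).getD (m - 1) "" := by
              rw [pv_getD_set, if_neg (by rintro ⟨h1, -⟩; omega)]
            have hc2 : ((grid.getD q []).set 0 ((grid.getD (n - 1 - q) []).getD 0 "")).getD (m - 1) "" =
                (grid.getD q []).getD (m - 1) "" := by
              rw [pv_getD_set, if_neg (by rintro ⟨h1, -⟩; omega)]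
            rw [hc1, hc2]
            split_ifs with h1 h2
            · rfl
            · rfl
            · rw [hN1, pv_getD_set2, if_neg h1, if_neg h2]
        refine ⟨?_, ?_⟩
        · -- length: the cs fold only sets, so length is preserved
          by_cases hmone : m = 1
          · rw [if_pos hmone]
            simp only [List.foldl_cons, List.foldl_nil, List.length_set]
            exact ihl
          · rw [if_neg hmone]
            simp only [List.foldl_cons, List.foldl_nil, List.length_set]
            exact ihl
        · intro r
          rw [step r]
          by_cases hrk : r = n - 1 - q
          · rw [if_pos ⟨hrk, hkN⟩,
                if_pos (show r < q + 1 ∨ (n - (q + 1) ≤ r ∧ r < n) by omega), hrk]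
            rw [pv_pvRow_interior grid (n - 1 - q) hkpos (by omega : n - 1 - q < grid.length - 1)
                (by simp only [← hm]; omega) (by simp only [← hm]; exact hrowlen_k)]
            simp only [← hn, ← hm]
            have he : n - 1 - (n - 1 - q) = q := by omega
            rw [he]
          · rw [if_neg (by rintro ⟨h1, -⟩; exact hrk h1)]
            by_cases hri : r = q
            · rw [if_pos ⟨hri, hiN⟩,
                  if_pos (show r < q + 1 ∨ (n - (q + 1) ≤ r ∧ r < n) by omega), hri]
              rw [pv_pvRow_interior grid q hqpos (by omega : q < grid.length - 1)
                  (by simp only [← hm]; omega) (by simp only [← hm]; exact hrowlen_i)]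
            · rw [if_neg (by rintro ⟨h1, -⟩; exact hri h1), ihval r]
              have : (r < q ∨ (n - q ≤ r ∧ r < n)) ↔ (r < q + 1 ∨ (n - (q + 1) ≤ r ∧ r < n)) := by
                constructor
                · rintro (h | ⟨h1, h2⟩)
                  · left; omega
                  · right; exact ⟨by omega, h2⟩
                · rintro (h | ⟨h1, h2⟩)
                  · left; omega
                  · right
                    refine ⟨?_, h2⟩
                    rcases Nat.eq_or_lt_of_le h1 with h3 | h3
                    · exfalso; exact hrk (by omega)
                    · omega
              rw [if_congr this rfl rfl]
  obtain ⟨hl, hval⟩ := main (n / 2) le_rfl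
  apply pv_eq_of_getD ([] : List String)
  · rw [hl]; simp
  · intro r hr
    rw [hl] at hr
    rw [hval r, List.getD_eq_getElem _ _ (by simpa using hr : r < ((List.range n).map (fun r => pvRow grid r)).length)]
    simp only [List.getElem_map, List.getElem_range]
    by_cases hcov : r < n / 2 ∨ (n - n / 2 ≤ r ∧ r < n)
    · rw [if_pos hcov]
    · rw [if_neg hcov]
      -- only the middle row of an odd-height grid is uncovered; there pvRow is the row itself
      have hmid : n - 1 - r = r := by omega
      rw [pv_pvRow_middle grid r (by simp only [← hn]; exact hmid) (by simp only [← hm]; exact hge' r hr)]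

-- ===== VERDICT (by name: the statement is the Claim_ definition above) =====
theorem flip_vert_spec : Claim_equal_flip_vert := by
  intro grid _ hpre
  unfold Spec_flip_vert
  rw [pv_A_eq_target grid hpre, pv_B_eq_target grid hpre]
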